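-- pv_equiv track=rewrite | github.com/suoaiyisheng/ytAutoAgent | app/tools/test_tabcode_image.py | _pick_models
-- ===== SOURCE A (Python) =====
-- def _pick_models(all_models: list[str], requested_model: str) -> list[str]:
--     req = requested_model.strip()
--     if req and req.lower() != "auto":
--         return [req]
--
--     if all_models:
--         keywords = ("banana", "gemini", "image", "seed", "flux", "sdxl")
--         ranked = sorted(
--             all_models,
--             key=lambda mid: (
--                 0
--                 if any(key in mid.lower() for key in keywords)
--                 else 1,
--                 len(mid),
--                 mid,
--             ),
--         )
--         return ranked[:8]
--
--     return [
--         "banana",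
--         "gemini-2.5-flash-image",
--         "google/gemini-2.5-flash-image",
--     ]
-- ===== SOURCE B (Python) =====
-- def _pick_models(all_models: list[str], requested_model: str) -> list[str]:
--     req = requested_model.strip()
--     if req and req.lower() != "auto":
--         return [req]
--
--     if all_models:
--         keywords = ("banana", "gemini", "image", "seed", "flux", "sdxl")
--
--         def hit(mid):
--             low = mid.lower()
--             return any(k in low for k in keywords)
--
--         hits = [m for m in all_models if hit(m)]
--         misses = [m for m in all_models if not hit(m)]
--         subkey = lambda mid: (len(mid), mid)
--         return (sorted(hits, key=subkey) + sorted(misses, key=subkey))[:8]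
--
--     return [
--         "banana",
--         "gemini-2.5-flash-image",
--         "google/gemini-2.5-flash-image",
--     ]
-- ===== Notes on version B (the rewrite author's own statement) =====
-- stated objective: alternative
-- what changed: Instead of one full sort under the composite key (keyword-hit, len, name) followed by [:8], B partitions the models into keyword hits and misses, sorts each bucket by (len, name) only, concatenates and slices; equality follows because the stable composite sort groups hits before misses.
import Mathlib
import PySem

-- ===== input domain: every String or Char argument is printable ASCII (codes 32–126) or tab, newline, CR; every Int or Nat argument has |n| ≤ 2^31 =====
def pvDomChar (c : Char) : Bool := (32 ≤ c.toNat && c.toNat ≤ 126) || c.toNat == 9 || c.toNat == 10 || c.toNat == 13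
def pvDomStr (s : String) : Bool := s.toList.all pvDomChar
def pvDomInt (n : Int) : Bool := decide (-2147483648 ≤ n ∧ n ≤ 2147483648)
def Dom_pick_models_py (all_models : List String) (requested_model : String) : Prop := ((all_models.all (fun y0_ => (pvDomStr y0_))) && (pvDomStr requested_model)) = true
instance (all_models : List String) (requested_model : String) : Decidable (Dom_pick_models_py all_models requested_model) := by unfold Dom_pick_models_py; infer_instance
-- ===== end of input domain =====

-- B replaces A's single full sort under the composite key (keyword-hit, len, name) by
-- partitioning into keyword hits / misses first, sorting each bucket by (len, name), and
-- slicing the concatenation; objective: alternative (same cost, different decomposition).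

-- ===== PORT A =====
-- shared literal from both sources: the keyword tuple, and the 'any(key in mid.lower() …)' test
def pvKeywords : List String := ["banana", "gemini", "image", "seed", "flux", "sdxl"]

def pvHit (mid : String) : Bool := pvKeywords.any (fun key => PySem.Str.isIn key (PySem.Str.lower mid))

def pick_models_py (all_models : List String) (requested_model : String) : List String :=
  let req := PySem.Str.strip requested_model
  if req ≠ "" ∧ PySem.Str.lower req ≠ "auto" then [req]
  else if all_models ≠ [] then
    -- sorted(all_models, key=lambda mid: (0 if any(...) else 1, len(mid), mid)); the
    -- 3-tuple key is grouped as (first, (len, mid)): PySem.List.sorted2 with a Lex pair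
    let ranked := PySem.List.sorted2 all_models
      (fun mid => (if pvHit mid then 0 else 1 : Int))
      (fun mid => toLex ((PySem.Str.len mid), mid))
    PySem.List.slice ranked none (some 8)
  else ["banana", "gemini-2.5-flash-image", "google/gemini-2.5-flash-image"]

-- ===== PORT B =====
-- sub-key (len(mid), mid) used on each bucket; tuple order = Lex
def pvSubkey (mid : String) : Lex (Int × String) := toLex ((PySem.Str.len mid), mid)

def pick_models_py_alt (all_models : List String) (requested_model : String) : List String :=
  let req := PySem.Str.strip requested_model
  if req ≠ "" ∧ PySem.Str.lower req ≠ "auto" then [req]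
  else if all_models ≠ [] then
    let hits := all_models.filter (fun m => pvHit m)
    let misses := all_models.filter (fun m => !pvHit m)
    PySem.List.slice (PySem.List.sorted hits pvSubkey ++ PySem.List.sorted misses pvSubkey) none (some 8)
  else ["banana", "gemini-2.5-flash-image", "google/gemini-2.5-flash-image"]

-- ===== PRECONDITION & SPEC =====
def Spec_pick_models_py (all_models : List String) (requested_model : String) (out : List String) : Prop := out = pick_models_py_alt all_models requested_model
instance (all_models : List String) (requested_model : String) (out : List String) : Decidable (Spec_pick_models_py all_models requested_model out) := by unfold Spec_pick_models_py; infer_instance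

-- ===== CLAIM (what is proved, stated in full; the proofs are below) =====
def Claim_equal_pick_models_py : Prop := ∀ (all_models : List String) (requested_model : String), Dom_pick_models_py all_models requested_model → Spec_pick_models_py all_models requested_model (pick_models_py all_models requested_model)

-- ===== LEMMAS AND PROOFS =====

-- A's composite key as a single Lex triple, for the ordering lemmas
def pvTriple (mid : String) : Lex (Int × Lex (Int × String)) :=
  toLex (((if pvHit mid then 0 else 1 : Int)), toLex ((PySem.Str.len mid), mid))

-- sorted2 (the tuple-key sort) IS sorted under the corresponding Lex key
theorem pv_sorted2_eq_sorted_lex {α κ₁ κ₂ : Type} [LinearOrder κ₁] [LinearOrder κ₂]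
    (xs : List α) (k1 : α → κ₁) (k2 : α → κ₂) :
    PySem.List.sorted2 xs k1 k2 = PySem.List.sorted xs (fun x => toLex (k1 x, k2 x)) := by
  rw [PySem.List.sorted_eq_foldl_insertBy]
  unfold PySem.List.sorted2
  have hf : (fun a b => decide (k1 a < k1 b) || (!decide (k1 b < k1 a) && decide (k2 a < k2 b)))
      = (fun a b => decide ((fun x => toLex (k1 x, k2 x)) a < (fun x => toLex (k1 x, k2 x)) b)) := by
    funext a b
    rcases lt_trichotomy (k1 a) (k1 b) with h | h | h
    · simp [h, Prod.Lex.lt_iff]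
    · by_cases h2 : k2 a < k2 b <;> simp [h, h2, Prod.Lex.lt_iff]
    · simp [h, h.not_gt, h.ne', Prod.Lex.lt_iff]
  simp only [hf]
  rfl

theorem pv_triple_le_of_sub {a b : String} (h : pvHit a = pvHit b)
    (hab : pvSubkey a ≤ pvSubkey b) : pvTriple a ≤ pvTriple b := by
  simp only [pvTriple, pvSubkey] at *
  rw [Prod.Lex.le_iff]
  right
  exact ⟨by simp [h], by simpa using hab⟩

theorem pvTriple_injective : Function.Injective pvTriple := by
  intro a b h
  have := congrArg (fun x => (ofLex (ofLex x).2).2) h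
  simpa [pvTriple] using this

-- the core fact: one stable sort under the composite key = sort each bucket, then append
theorem pv_sorted_split (l : List String) :
    PySem.List.sorted l pvTriple
      = PySem.List.sorted (l.filter (fun m => pvHit m)) pvSubkey
        ++ PySem.List.sorted (l.filter (fun m => !pvHit m)) pvSubkey := by
  apply PySem.List.eq_of_perm_of_pairwise_le_of_injective pvTriple pvTriple_injective
  · exact (PySem.List.sorted_perm l pvTriple false).trans
      (((PySem.List.sorted_perm _ pvSubkey false).append
          (PySem.List.sorted_perm _ pvSubkey false)).trans
        (List.filter_append_perm _ l)).symm
  · exact PySem.List.sorted_pairwise l pvTriple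
  · rw [List.pairwise_append]
    refine ⟨?_, ?_, ?_⟩
    · refine (PySem.List.sorted_pairwise _ pvSubkey).imp_of_mem ?_
      intro a b ha hb hab
      have ha' : pvHit a = true := (List.mem_filter.1 ((PySem.List.mem_sorted _ _ _ _).1 ha)).2
      have hb' : pvHit b = true := (List.mem_filter.1 ((PySem.List.mem_sorted _ _ _ _).1 hb)).2
      exact pv_triple_le_of_sub (ha'.trans hb'.symm) hab
    · refine (PySem.List.sorted_pairwise _ pvSubkey).imp_of_mem ?_
      intro a b ha hb hab
      have ha' : pvHit a = false := by
        simpa using (List.mem_filter.1 ((PySem.List.mem_sorted _ _ _ _).1 ha)).2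
      have hb' : pvHit b = false := by
        simpa using (List.mem_filter.1 ((PySem.List.mem_sorted _ _ _ _).1 hb)).2
      exact pv_triple_le_of_sub (ha'.trans hb'.symm) hab
    · intro a ha b hb
      have ha' : pvHit a = true := (List.mem_filter.1 ((PySem.List.mem_sorted _ _ _ _).1 ha)).2
      have hb' : pvHit b = false := by
        simpa using (List.mem_filter.1 ((PySem.List.mem_sorted _ _ _ _).1 hb)).2
      simp only [pvTriple, ha', hb']
      rw [Prod.Lex.le_iff]
      left; simp

-- ===== VERDICT (by name: the statement is the Claim_ definition above) =====
theorem pick_models_py_spec : Claim_equal_pick_models_py := by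
  intro all_models requested_model _
  unfold Spec_pick_models_py pick_models_py pick_models_py_alt
  simp only [pv_sorted2_eq_sorted_lex]
  have h : (fun mid => toLex (((if pvHit mid then 0 else 1 : Int)), toLex ((PySem.Str.len mid), mid))) = pvTriple := rfl
  simp only [h, pv_sorted_split]
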